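-- pv_equiv track=rewrite | github.com/SayeemRaza50/compliance-checker | src/checker.py | _normalize_license_string
-- ===== SOURCE A (Python) =====
-- ALIAS_MAP = {
--     "GPL V3": "GPL-3.0-only",
--     "GPL V2": "GPL-2.0-only",
--     "APACHE LICENSE 2.0": "Apache-2.0",
--     "APACHE 2.0": "Apache-2.0",
--     "MIT LICENSE": "MIT",
--     "BSD 3-CLAUSE": "BSD-3-Clause",
--     "MPL 2.0": "MPL-2.0",
-- }
--
-- def _normalize_license_string(license_str: str) -> str:
--     if not license_str:
--         return license_str
--     cleaned = license_str.strip().upper().replace("LICENSE", "").replace("THE ", "")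
--     cleaned = " ".join(cleaned.split())
--     if cleaned in ALIAS_MAP:
--         return ALIAS_MAP[cleaned]
--
--     normalized_parts = []
--     parts = cleaned.split()
--     i = 0
--     while i < len(parts):
--         found_match = False
--         for length in range(min(4, len(parts) - i), 0, -1):
--             phrase = " ".join(parts[i:i+length])
--             if phrase in ALIAS_MAP:
--                 normalized_parts.append(ALIAS_MAP[phrase])
--                 i += length
--                 found_match = True
--                 break
--         if not found_match:
--             normalized_parts.append(parts[i])
--             i += 1
--     return " ".join(normalized_parts)
-- ===== SOURCE B (Python) =====
-- ALIAS_MAP = {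
--     "GPL V3": "GPL-3.0-only",
--     "GPL V2": "GPL-2.0-only",
--     "APACHE LICENSE 2.0": "Apache-2.0",
--     "APACHE 2.0": "Apache-2.0",
--     "MIT LICENSE": "MIT",
--     "BSD 3-CLAUSE": "BSD-3-Clause",
--     "MPL 2.0": "MPL-2.0",
-- }
--
-- # Index the alias keys by their first word, longest key first, so the scan
-- # does a single dict lookup per word instead of joining and probing every
-- # window length; splitting the cleaned text once also subsumes A's
-- # whitespace-collapse join and its separate whole-string lookup.
-- _INDEX = {}
-- for _k, _v in ALIAS_MAP.items():
--     _w = _k.split()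
--     _INDEX.setdefault(_w[0], []).append((_w, _v))
-- for _c in _INDEX.values():
--     _c.sort(key=lambda kv: -len(kv[0]))
--
--
-- def _normalize_license_string(license_str: str) -> str:
--     words = license_str.strip().upper().replace("LICENSE", "").replace("THE ", "").split()
--     out = []
--     i = 0
--     n = len(words)
--     while i < n:
--         for key_words, value in _INDEX.get(words[i], ()):
--             k = len(key_words)
--             if words[i:i + k] == key_words:
--                 out.append(value)
--                 i += k
--                 break
--         else:
--             out.append(words[i])
--             i += 1
--     return " ".join(out)
-- ===== Notes on version B (the rewrite author's own statement) =====
-- stated objective: alternative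
-- what changed: replaces A's per-position scheme of joining every window length (4..1) into a phrase and probing the alias dict, plus a separate whole-string lookup after a whitespace-collapsing join, by a hash index of the alias keys on their first word (longest key first) consulted once per word, splitting the cleaned text only once
import Mathlib
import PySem

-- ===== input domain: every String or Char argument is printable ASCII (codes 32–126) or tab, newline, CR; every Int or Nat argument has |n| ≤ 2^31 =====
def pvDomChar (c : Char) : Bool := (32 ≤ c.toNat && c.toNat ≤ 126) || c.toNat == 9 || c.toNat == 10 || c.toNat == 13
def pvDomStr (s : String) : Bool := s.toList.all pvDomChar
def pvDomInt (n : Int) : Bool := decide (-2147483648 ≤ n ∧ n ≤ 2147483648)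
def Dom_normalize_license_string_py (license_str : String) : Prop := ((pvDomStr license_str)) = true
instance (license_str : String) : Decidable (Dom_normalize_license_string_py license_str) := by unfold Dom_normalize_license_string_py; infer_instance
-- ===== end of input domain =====

-- B replaces A's join-every-window-and-probe matcher (and its separate whole-string
-- lookup after a whitespace-collapsing join) by a first-word index of the alias keys,
-- longest key first, consulted once per word: an alternative of similar cost.

-- ===== PORT A =====
def pvAliasMap : PySem.Dict String String :=
  ⟨[("GPL V3", "GPL-3.0-only"),
    ("GPL V2", "GPL-2.0-only"),
    ("APACHE LICENSE 2.0", "Apache-2.0"),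
    ("APACHE 2.0", "Apache-2.0"),
    ("MIT LICENSE", "MIT"),
    ("BSD 3-CLAUSE", "BSD-3-Clause"),
    ("MPL 2.0", "MPL-2.0")]⟩

-- the inner 'for length in range(min(4, len(parts) - i), 0, -1): … break' of A
def pvAFind (parts : List String) (i : Nat) : Option (String × Nat) :=
  (PySem.List.pyRange (min 4 ((parts.length : Int) - (i : Int))) 0 (-1)).findSome? (fun len =>
    let phrase := PySem.Str.join " " (PySem.List.slice parts (some (i : Int)) (some ((i : Int) + len)))
    match PySem.Dict.get? pvAliasMap phrase with
    | some v => some (v, len.toNat)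
    | none => none)

-- A's 'while i < len(parts)' loop; fuel = parts.length bounds its iterations
-- (each step advances i by at least 1), so the transcription is exact.
def pvALoop : Nat → List String → Nat → List String → List String
  | 0, _, _, acc => acc
  | fuel + 1, parts, i, acc =>
    if h : i < parts.length then
      match pvAFind parts i with
      | some (v, len) => pvALoop fuel parts (i + len) (acc ++ [v])
      | none => pvALoop fuel parts (i + 1) (acc ++ [parts[i]])
    else acc

def normalize_license_string_py (license_str : String) : String :=
  if license_str = "" then license_str
  else
    let cleaned0 := PySem.Str.replace (PySem.Str.replace (PySem.Str.upper (PySem.Str.strip license_str)) "LICENSE" "") "THE " ""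
    let cleaned := PySem.Str.join " " (PySem.Str.split₀ cleaned0)
    match PySem.Dict.get? pvAliasMap cleaned with
    | some v => v
    | none =>
      let parts := PySem.Str.split₀ cleaned
      PySem.Str.join " " (pvALoop parts.length parts 0 [])

-- ===== PORT B =====
-- Source B's module-level _INDEX (alias keys indexed by first word, each candidate list
-- sorted by descending word count), written out as the literal it computes to at import time.
def pvIndex : PySem.Dict String (List (List String × String)) :=
  ⟨[("GPL", [(["GPL", "V3"], "GPL-3.0-only"), (["GPL", "V2"], "GPL-2.0-only")]),
    ("APACHE", [(["APACHE", "LICENSE", "2.0"], "Apache-2.0"), (["APACHE", "2.0"], "Apache-2.0")]),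
    ("MIT", [(["MIT", "LICENSE"], "MIT")]),
    ("BSD", [(["BSD", "3-CLAUSE"], "BSD-3-Clause")]),
    ("MPL", [(["MPL", "2.0"], "MPL-2.0")])]⟩

-- Source B's 'for key_words, value in _INDEX.get(words[i], ()): … break'
def pvBFind (cands : List (List String × String)) (words : List String) (i : Nat) : Option (String × Nat) :=
  cands.findSome? (fun kv =>
    if PySem.List.slice words (some (i : Int)) (some ((i : Int) + (kv.1.length : Int))) = kv.1 then
      some (kv.2, kv.1.length)
    else none)

-- Source B's 'while i < n' loop; fuel = words.length bounds its iterations.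
def pvBLoop : Nat → List String → Nat → List String → List String
  | 0, _, _, out => out
  | fuel + 1, words, i, out =>
    if h : i < words.length then
      match pvBFind (PySem.Dict.getD pvIndex words[i] []) words i with
      | some (v, k) => pvBLoop fuel words (i + k) (out ++ [v])
      | none => pvBLoop fuel words (i + 1) (out ++ [words[i]])
    else out

def normalize_license_string_py_alt (license_str : String) : String :=
  let words := PySem.Str.split₀ (PySem.Str.replace (PySem.Str.replace (PySem.Str.upper (PySem.Str.strip license_str)) "LICENSE" "") "THE " "")
  PySem.Str.join " " (pvBLoop words.length words 0 [])

-- ===== PRECONDITION & SPEC =====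
def Spec_normalize_license_string_py (license_str : String) (out : String) : Prop := out = normalize_license_string_py_alt license_str
instance (license_str : String) (out : String) : Decidable (Spec_normalize_license_string_py license_str out) := by unfold Spec_normalize_license_string_py; infer_instance

-- ===== CLAIM (what is proved, stated in full; the proofs are below) =====
def Claim_equal_normalize_license_string_py : Prop := ∀ (license_str : String), Dom_normalize_license_string_py license_str → Spec_normalize_license_string_py license_str (normalize_license_string_py license_str)

-- ===== LEMMAS AND PROOFS =====
set_option maxRecDepth 8192
set_option maxHeartbeats 1000000

-- words that are nonempty and contain no whitespace character (split₀ output shape)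
def pvSFc (css : List (List Char)) : Prop :=
  ∀ cs ∈ css, cs ≠ [] ∧ ∀ c ∈ cs, PySem.Chars.isspace c = false

def pvSF (ws : List String) : Prop :=
  ∀ w ∈ ws, w.toList ≠ [] ∧ ∀ c ∈ w.toList, PySem.Chars.isspace c = false

lemma pv_sf_toList {ws : List String} (h : pvSF ws) : pvSFc (ws.map String.toList) := by
  intro cs hcs
  rcases List.mem_map.1 hcs with ⟨w, hw, rfl⟩
  exact h w hw

lemma pv_map_ofList_toList (l : List String) : l.map (String.ofList ∘ String.toList) = l := by
  induction l with
  | nil => rfl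
  | cons a l ih => simp [ih, String.ofList_toList]

-- split₀.go consumes a whitespace-free block into cur
lemma pv_go_app (w : List Char) (s cur : List Char) (acc : List (List Char))
    (hw : ∀ c ∈ w, PySem.Chars.isspace c = false) :
    PySem.Chars.split₀.go (w ++ s) cur acc = PySem.Chars.split₀.go s (w.reverse ++ cur) acc := by
  induction w generalizing cur with
  | nil => simp
  | cons c w ih =>
    have hc : PySem.Chars.isspace c = false := hw c (by simp)
    have hw' : ∀ d ∈ w, PySem.Chars.isspace d = false := fun d hd => hw d (List.mem_cons_of_mem _ hd)
    rw [List.cons_append,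
      show PySem.Chars.split₀.go (c :: (w ++ s)) cur acc
        = PySem.Chars.split₀.go (w ++ s) (c :: cur) acc from by
          simp [PySem.Chars.split₀.go, hc],
      ih (c :: cur) hw']
    simp

lemma pv_go_join (css : List (List Char)) (acc : List (List Char)) (h : pvSFc css) :
    PySem.Chars.split₀.go (PySem.Chars.join [' '] css) [] acc = acc.reverse ++ css := by
  induction css generalizing acc with
  | nil => simp [PySem.Chars.join_nil, PySem.Chars.split₀.go]
  | cons w css ih =>
    have hw := h w (by simp)
    cases css with
    | nil =>
      rw [PySem.Chars.join_singleton, ← List.append_nil w, pv_go_app w [] [] acc hw.2]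
      simp [PySem.Chars.split₀.go, List.isEmpty_iff, hw.1]
    | cons v css' =>
      rw [PySem.Chars.join_cons_cons, List.append_assoc, pv_go_app w _ [] acc hw.2,
        List.append_nil]
      have hsp : PySem.Chars.isspace ' ' = true := by decide
      have hne : w.reverse.isEmpty = false := by simp [hw.1]
      try simp only [List.singleton_append]
      rw [show PySem.Chars.split₀.go (' ' :: PySem.Chars.join [' '] (v :: css')) w.reverse acc
            = PySem.Chars.split₀.go (PySem.Chars.join [' '] (v :: css')) [] (w.reverse.reverse :: acc) from by
          simp [PySem.Chars.split₀.go, hsp, hne]]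
      rw [List.reverse_reverse, ih (w :: acc) (fun cs hcs => h cs (by simp [hcs]))]
      simp

lemma pv_split_join_chars (css : List (List Char)) (h : pvSFc css) :
    PySem.Chars.split₀ (PySem.Chars.join [' '] css) = css := by
  unfold PySem.Chars.split₀
  simpa using pv_go_join css [] h

lemma pv_split₀_join (ws : List String) (h : pvSF ws) :
    PySem.Str.split₀ (PySem.Str.join " " ws) = ws := by
  unfold PySem.Str.split₀
  rw [PySem.Str.toList_join]
  rw [show (" " : String).toList = [' '] from rfl]
  rw [pv_split_join_chars _ (pv_sf_toList h)]
  rw [List.map_map]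
  exact pv_map_ofList_toList ws

-- every word split₀ returns is nonempty and whitespace-free
lemma pv_go_sf (s : List Char) : ∀ (cur : List Char) (acc : List (List Char)),
    pvSFc acc → (∀ c ∈ cur, PySem.Chars.isspace c = false) →
    pvSFc (PySem.Chars.split₀.go s cur acc) := by
  induction s with
  | nil =>
    intro cur acc hacc hcur
    by_cases hc : cur = []
    · subst hc
      intro cs hcs
      simp [PySem.Chars.split₀.go] at hcs
      exact hacc cs hcs
    · have hne : cur.isEmpty = false := by simp [List.isEmpty_iff, hc]
      intro cs hcs
      simp [PySem.Chars.split₀.go, hne] at hcs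
      rcases hcs with hcs | hcs
      · exact hacc cs hcs
      · subst hcs
        exact ⟨by simp [hc], fun d hd => hcur d (by simpa using hd)⟩
  | cons c s ih =>
    intro cur acc hacc hcur
    by_cases hsp : PySem.Chars.isspace c = true
    · by_cases hc : cur = []
      · subst hc
        rw [show PySem.Chars.split₀.go (c :: s) [] acc = PySem.Chars.split₀.go s [] acc from by
          simp [PySem.Chars.split₀.go, hsp]]
        exact ih [] acc hacc (by simp)
      · have hne : cur.isEmpty = false := by simp [List.isEmpty_iff, hc]
        rw [show PySem.Chars.split₀.go (c :: s) cur acc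
              = PySem.Chars.split₀.go s [] (cur.reverse :: acc) from by
            simp [PySem.Chars.split₀.go, hsp, hne]]
        refine ih [] (cur.reverse :: acc) ?_ (by simp)
        intro cs hcs
        rcases List.mem_cons.1 hcs with rfl | hcs
        · exact ⟨by simp [hc], fun d hd => hcur d (by simpa using hd)⟩
        · exact hacc cs hcs
    · have hspf : PySem.Chars.isspace c = false := by simpa using hsp
      rw [show PySem.Chars.split₀.go (c :: s) cur acc = PySem.Chars.split₀.go s (c :: cur) acc from by
        simp [PySem.Chars.split₀.go, hspf]]
      refine ih (c :: cur) acc hacc ?_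
      intro d hd
      rcases List.mem_cons.1 hd with rfl | hd
      · exact hspf
      · exact hcur d hd

lemma pv_sf_split₀ (s : String) : pvSF (PySem.Str.split₀ s) := by
  intro w hw
  unfold PySem.Str.split₀ at hw
  rcases List.mem_map.1 hw with ⟨cs, hcs, rfl⟩
  have := pv_go_sf s.toList [] [] (by intro cs h; simp at h) (by simp) cs
    (by simpa [PySem.Chars.split₀] using hcs)
  simpa using this

-- " "-join is injective on nonempty space-free word lists
lemma pv_sep_inj (a : List Char) : ∀ (b x y : List Char), ' ' ∉ a → ' ' ∉ b →
    a ++ ' ' :: x = b ++ ' ' :: y → a = b ∧ x = y := by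
  induction a with
  | nil =>
    intro b x y _ hb h
    cases b with
    | nil => simpa using h
    | cons c b' =>
      simp at h
      exact absurd (by simp [← h.1] : ' ' ∈ c :: b') hb
  | cons c a' ih =>
    intro b x y ha hb h
    cases b with
    | nil =>
      simp at h
      exact absurd (by simp [h.1] : ' ' ∈ c :: a') ha
    | cons d b' =>
      simp at h
      obtain ⟨rfl, h2⟩ := h
      have := ih b' x y (fun m => ha (by simp [m])) (fun m => hb (by simp [m])) h2
      exact ⟨by simp [this.1], this.2⟩

lemma pv_nospace {cs : List Char} (h : ∀ c ∈ cs, PySem.Chars.isspace c = false) : ' ' ∉ cs := by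
  intro m
  have := h ' ' m
  simp [PySem.Chars.isspace] at this

-- nonempty, space-free words (what " "-join-injectivity actually needs)
def pvNSc (css : List (List Char)) : Prop :=
  ∀ cs ∈ css, cs ≠ [] ∧ ' ' ∉ cs

lemma pv_sf_to_ns {ws : List String} (h : pvSF ws) : pvNSc (ws.map String.toList) := by
  intro cs hcs
  rcases List.mem_map.1 hcs with ⟨w, hw, rfl⟩
  exact ⟨(h w hw).1, pv_nospace (h w hw).2⟩

lemma pv_join_inj (css : List (List Char)) : ∀ (dss : List (List Char)),
    pvNSc css → pvNSc dss →
    PySem.Chars.join [' '] css = PySem.Chars.join [' '] dss → css = dss := by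
  induction css with
  | nil =>
    intro dss _ hd h
    cases dss with
    | nil => rfl
    | cons v vs =>
      exfalso
      cases vs with
      | nil =>
        rw [PySem.Chars.join_nil, PySem.Chars.join_singleton] at h
        exact (hd v (by simp)).1 h.symm
      | cons v' vs' =>
        rw [PySem.Chars.join_nil, PySem.Chars.join_cons_cons] at h
        have : ' ' ∈ ([] : List Char) := by rw [h]; simp
        simp at this
  | cons w ws ih =>
    intro dss hc hd h
    cases dss with
    | nil =>
      exfalso
      cases ws with
      | nil =>
        rw [PySem.Chars.join_nil, PySem.Chars.join_singleton] at h
        exact (hc w (by simp)).1 h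
      | cons w' ws' =>
        rw [PySem.Chars.join_nil, PySem.Chars.join_cons_cons] at h
        have : ' ' ∈ ([] : List Char) := by rw [← h]; simp
        simp at this
    | cons v vs =>
      cases ws with
      | nil =>
        cases vs with
        | nil =>
          rw [PySem.Chars.join_singleton, PySem.Chars.join_singleton] at h
          simp [h]
        | cons v' vs' =>
          exfalso
          rw [PySem.Chars.join_singleton, PySem.Chars.join_cons_cons] at h
          exact (hc w (by simp)).2 (by rw [h]; simp)
      | cons w' ws' =>
        cases vs with
        | nil =>
          exfalso
          rw [PySem.Chars.join_singleton, PySem.Chars.join_cons_cons] at h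
          exact (hd v (by simp)).2 (by rw [← h]; simp)
        | cons v' vs' =>
          rw [PySem.Chars.join_cons_cons, PySem.Chars.join_cons_cons] at h
          simp only [List.append_assoc, List.cons_append, List.nil_append] at h
          have := pv_sep_inj w v _ _
            ((hc w (by simp)).2) ((hd v (by simp)).2) h
          obtain ⟨rfl, h2⟩ := this
          have := ih (v' :: vs') (fun cs m => hc cs (by simp at m ⊢; tauto))
            (fun cs m => hd cs (by simp at m ⊢; tauto)) h2
          simp [this]

lemma pv_key_eq (ws : List String) (h : pvSF ws) (Kw : List String) (K : String)
    (h1 : pvNSc (Kw.map String.toList)) (h2 : PySem.Str.join " " Kw = K) :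
    (PySem.Str.join " " ws = K ↔ ws = Kw) := by
  constructor
  · intro he
    have hl : PySem.Chars.join [' '] (ws.map String.toList)
        = PySem.Chars.join [' '] (Kw.map String.toList) := by
      have := congrArg String.toList (he.trans h2.symm)
      simpa [PySem.Str.toList_join] using this
    have h3 := pv_join_inj _ _ (pv_sf_to_ns h) h1 hl
    have h4 := congrArg (List.map String.ofList) h3
    rw [List.map_map, List.map_map, pv_map_ofList_toList, pv_map_ofList_toList] at h4
    exact h4
  · rintro rfl; exact h2

-- the dict lookup of a " "-joined phrase, characterised on the word list
lemma pv_lookup (ws : List String) (h : pvSF ws) :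
    PySem.Dict.get? pvAliasMap (PySem.Str.join " " ws) =
      (if ws = ["GPL", "V3"] then some "GPL-3.0-only"
       else if ws = ["GPL", "V2"] then some "GPL-2.0-only"
       else if ws = ["APACHE", "LICENSE", "2.0"] then some "Apache-2.0"
       else if ws = ["APACHE", "2.0"] then some "Apache-2.0"
       else if ws = ["MIT", "LICENSE"] then some "MIT"
       else if ws = ["BSD", "3-CLAUSE"] then some "BSD-3-Clause"
       else if ws = ["MPL", "2.0"] then some "MPL-2.0"
       else none) := by
  have e1 := pv_key_eq ws h ["GPL", "V3"] "GPL V3" (by intro cs hcs; simp at hcs; rcases hcs with rfl | rfl <;> exact ⟨by simp, by simp⟩) (by decide)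
  have e2 := pv_key_eq ws h ["GPL", "V2"] "GPL V2" (by intro cs hcs; simp at hcs; rcases hcs with rfl | rfl <;> exact ⟨by simp, by simp⟩) (by decide)
  have e3 := pv_key_eq ws h ["APACHE", "LICENSE", "2.0"] "APACHE LICENSE 2.0" (by intro cs hcs; simp at hcs; rcases hcs with rfl | rfl | rfl <;> exact ⟨by simp, by simp⟩) (by decide)
  have e4 := pv_key_eq ws h ["APACHE", "2.0"] "APACHE 2.0" (by intro cs hcs; simp at hcs; rcases hcs with rfl | rfl <;> exact ⟨by simp, by simp⟩) (by decide)
  have e5 := pv_key_eq ws h ["MIT", "LICENSE"] "MIT LICENSE" (by intro cs hcs; simp at hcs; rcases hcs with rfl | rfl <;> exact ⟨by simp, by simp⟩) (by decide)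
  have e6 := pv_key_eq ws h ["BSD", "3-CLAUSE"] "BSD 3-CLAUSE" (by intro cs hcs; simp at hcs; rcases hcs with rfl | rfl <;> exact ⟨by simp, by simp⟩) (by decide)
  have e7 := pv_key_eq ws h ["MPL", "2.0"] "MPL 2.0" (by intro cs hcs; simp at hcs; rcases hcs with rfl | rfl <;> exact ⟨by simp, by simp⟩) (by decide)
  by_cases c1 : ws = ["GPL", "V3"]
  · rw [c1]; decide
  by_cases c2 : ws = ["GPL", "V2"]
  · rw [c2]; decide
  by_cases c3 : ws = ["APACHE", "LICENSE", "2.0"]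
  · rw [c3]; decide
  by_cases c4 : ws = ["APACHE", "2.0"]
  · rw [c4]; decide
  by_cases c5 : ws = ["MIT", "LICENSE"]
  · rw [c5]; decide
  by_cases c6 : ws = ["BSD", "3-CLAUSE"]
  · rw [c6]; decide
  by_cases c7 : ws = ["MPL", "2.0"]
  · rw [c7]; decide
  simp only [c1, c2, c3, c4, c5, c6, c7, if_false]
  have n1 : (("GPL V3" : String) == PySem.Str.join " " ws) = false := by
    simp; exact fun hh => c1 (e1.mp hh.symm)
  have n2 : (("GPL V2" : String) == PySem.Str.join " " ws) = false := by
    simp; exact fun hh => c2 (e2.mp hh.symm)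
  have n3 : (("APACHE LICENSE 2.0" : String) == PySem.Str.join " " ws) = false := by
    simp; exact fun hh => c3 (e3.mp hh.symm)
  have n4 : (("APACHE 2.0" : String) == PySem.Str.join " " ws) = false := by
    simp; exact fun hh => c4 (e4.mp hh.symm)
  have n5 : (("MIT LICENSE" : String) == PySem.Str.join " " ws) = false := by
    simp; exact fun hh => c5 (e5.mp hh.symm)
  have n6 : (("BSD 3-CLAUSE" : String) == PySem.Str.join " " ws) = false := by
    simp; exact fun hh => c6 (e6.mp hh.symm)
  have n7 : (("MPL 2.0" : String) == PySem.Str.join " " ws) = false := by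
    simp; exact fun hh => c7 (e7.mp hh.symm)
  simp [pvAliasMap, PySem.Dict.get?, List.find?, n1, n2, n3, n4, n5, n6, n7]

-- the per-position match both matchers compute
def pvMSpec (t : List String) : Option (String × Nat) :=
  if t.take 3 = ["APACHE", "LICENSE", "2.0"] then some ("Apache-2.0", 3)
  else if t.take 2 = ["GPL", "V3"] then some ("GPL-3.0-only", 2)
  else if t.take 2 = ["GPL", "V2"] then some ("GPL-2.0-only", 2)
  else if t.take 2 = ["APACHE", "2.0"] then some ("Apache-2.0", 2)
  else if t.take 2 = ["MIT", "LICENSE"] then some ("MIT", 2)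
  else if t.take 2 = ["BSD", "3-CLAUSE"] then some ("BSD-3-Clause", 2)
  else if t.take 2 = ["MPL", "2.0"] then some ("MPL-2.0", 2)
  else none

lemma pv_slice_take (parts : List String) (i k : Nat) :
    PySem.List.slice parts (some (i : Int)) (some ((i : Int) + (k : Int)))
      = (parts.drop i).take k := by
  rw [PySem.List.slice_toNat _ (by omega) (by omega)]
  have h1 : ((i : Int) + (k : Int)).toNat = i + k := by omega
  have h2 : ((i : Int)).toNat = i := by omega
  rw [h1, h2]
  congr 1
  omega

lemma pv_take_ne (t : List String) (k : Nat) (K : List String)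
    (h : min k t.length ≠ K.length) : t.take k ≠ K := by
  intro e
  exact h (by simpa using congrArg List.length e)

lemma pv_afind_eq (parts : List String) (hp : pvSF parts) (i : Nat) (hi : i < parts.length) :
    pvAFind parts i = pvMSpec (parts.drop i) := by
  have hlen : (parts.drop i).length = parts.length - i := by simp
  have hs1 : PySem.List.slice parts (some (i : Int)) (some ((i : Int) + 1)) = (parts.drop i).take 1 := by
    simpa using pv_slice_take parts i 1
  have hs2 : PySem.List.slice parts (some (i : Int)) (some ((i : Int) + 2)) = (parts.drop i).take 2 := by
    simpa using pv_slice_take parts i 2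
  have hs3 : PySem.List.slice parts (some (i : Int)) (some ((i : Int) + 3)) = (parts.drop i).take 3 := by
    simpa using pv_slice_take parts i 3
  have hs4 : PySem.List.slice parts (some (i : Int)) (some ((i : Int) + 4)) = (parts.drop i).take 4 := by
    simpa using pv_slice_take parts i 4
  have hsub : pvSF (parts.drop i) := fun w hw => hp w (List.mem_of_mem_drop hw)
  have hsf1 : pvSF ((parts.drop i).take 1) := fun w hw => hsub w (List.mem_of_mem_take hw)
  have hsf2 : pvSF ((parts.drop i).take 2) := fun w hw => hsub w (List.mem_of_mem_take hw)
  have hsf3 : pvSF ((parts.drop i).take 3) := fun w hw => hsub w (List.mem_of_mem_take hw)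
  have hsf4 : pvSF ((parts.drop i).take 4) := fun w hw => hsub w (List.mem_of_mem_take hw)
  have hl1 := pv_lookup _ hsf1
  have hl2 := pv_lookup _ hsf2
  have hl3 := pv_lookup _ hsf3
  have hl4 := pv_lookup _ hsf4
  set t := parts.drop i with htdef
  have hmint : ((parts.length : Int) - (i : Int)) = (t.length : Int) := by
    rw [hlen]; omega
  have ht1 : 1 ≤ t.length := by omega
  -- length-based impossibilities for the probes of sizes that fit no key
  have k12 : t.take 1 ≠ ["GPL", "V3"] := pv_take_ne t 1 _ (by simp; omega)
  have k12b : t.take 1 ≠ ["GPL", "V2"] := pv_take_ne t 1 _ (by simp; omega)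
  have k13 : t.take 1 ≠ ["APACHE", "LICENSE", "2.0"] := pv_take_ne t 1 _ (by simp; omega)
  have k12c : t.take 1 ≠ ["APACHE", "2.0"] := pv_take_ne t 1 _ (by simp; omega)
  have k12d : t.take 1 ≠ ["MIT", "LICENSE"] := pv_take_ne t 1 _ (by simp; omega)
  have k12e : t.take 1 ≠ ["BSD", "3-CLAUSE"] := pv_take_ne t 1 _ (by simp; omega)
  have k12f : t.take 1 ≠ ["MPL", "2.0"] := pv_take_ne t 1 _ (by simp; omega)
  unfold pvAFind
  rw [hmint]
  rcases (show t.length = 1 ∨ t.length = 2 ∨ t.length = 3 ∨ 4 ≤ t.length by omega) with hn | hn | hn | hn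
  · rw [show (min 4 ((t.length : Int)) : Int) = 1 by omega,
      show PySem.List.pyRange 1 0 (-1) = [1] from by decide]
    have m2 : t.take 2 ≠ ["GPL", "V3"] := pv_take_ne t 2 _ (by simp; omega)
    have m2b : t.take 2 ≠ ["GPL", "V2"] := pv_take_ne t 2 _ (by simp; omega)
    have m2c : t.take 2 ≠ ["APACHE", "2.0"] := pv_take_ne t 2 _ (by simp; omega)
    have m2d : t.take 2 ≠ ["MIT", "LICENSE"] := pv_take_ne t 2 _ (by simp; omega)
    have m2e : t.take 2 ≠ ["BSD", "3-CLAUSE"] := pv_take_ne t 2 _ (by simp; omega)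
    have m2f : t.take 2 ≠ ["MPL", "2.0"] := pv_take_ne t 2 _ (by simp; omega)
    have m3 : t.take 3 ≠ ["APACHE", "LICENSE", "2.0"] := pv_take_ne t 3 _ (by simp; omega)
    simp only [List.findSome?_cons, List.findSome?_nil]
    rw [hs1, hl1]
    simp only [if_neg k12, if_neg k12b, if_neg k13, if_neg k12c, if_neg k12d, if_neg k12e,
      if_neg k12f]
    simp only [pvMSpec, if_neg m2, if_neg m2b, if_neg m2c, if_neg m2d, if_neg m2e, if_neg m2f,
      if_neg m3]
  · rw [show (min 4 ((t.length : Int)) : Int) = 2 by omega,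
      show PySem.List.pyRange 2 0 (-1) = [2, 1] from by decide]
    have m23 : t.take 2 ≠ ["APACHE", "LICENSE", "2.0"] := pv_take_ne t 2 _ (by simp; omega)
    have m3 : t.take 3 ≠ ["APACHE", "LICENSE", "2.0"] := pv_take_ne t 3 _ (by simp; omega)
    simp only [List.findSome?_cons, List.findSome?_nil, hs1, hs2, hl1, hl2,
      if_neg k12, if_neg k12b, if_neg k13, if_neg k12c, if_neg k12d, if_neg k12e, if_neg k12f,
      if_neg m23, pvMSpec, if_neg m3]
    split_ifs <;> simp
  · rw [show (min 4 ((t.length : Int)) : Int) = 3 by omega,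
      show PySem.List.pyRange 3 0 (-1) = [3, 2, 1] from by decide]
    have m23 : t.take 2 ≠ ["APACHE", "LICENSE", "2.0"] := pv_take_ne t 2 _ (by simp; omega)
    have m32 : t.take 3 ≠ ["GPL", "V3"] := pv_take_ne t 3 _ (by simp; omega)
    have m32b : t.take 3 ≠ ["GPL", "V2"] := pv_take_ne t 3 _ (by simp; omega)
    have m32c : t.take 3 ≠ ["APACHE", "2.0"] := pv_take_ne t 3 _ (by simp; omega)
    have m32d : t.take 3 ≠ ["MIT", "LICENSE"] := pv_take_ne t 3 _ (by simp; omega)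
    have m32e : t.take 3 ≠ ["BSD", "3-CLAUSE"] := pv_take_ne t 3 _ (by simp; omega)
    have m32f : t.take 3 ≠ ["MPL", "2.0"] := pv_take_ne t 3 _ (by simp; omega)
    simp only [List.findSome?_cons, List.findSome?_nil, hs1, hs2, hs3, hl1, hl2, hl3,
      if_neg k12, if_neg k12b, if_neg k13, if_neg k12c, if_neg k12d, if_neg k12e, if_neg k12f,
      if_neg m23, if_neg m32, if_neg m32b, if_neg m32c, if_neg m32d, if_neg m32e, if_neg m32f,
      pvMSpec]
    split_ifs <;> simp
  · rw [show (min 4 ((t.length : Int)) : Int) = 4 by omega,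
      show PySem.List.pyRange 4 0 (-1) = [4, 3, 2, 1] from by decide]
    have m23 : t.take 2 ≠ ["APACHE", "LICENSE", "2.0"] := pv_take_ne t 2 _ (by simp; omega)
    have m32 : t.take 3 ≠ ["GPL", "V3"] := pv_take_ne t 3 _ (by simp; omega)
    have m32b : t.take 3 ≠ ["GPL", "V2"] := pv_take_ne t 3 _ (by simp; omega)
    have m32c : t.take 3 ≠ ["APACHE", "2.0"] := pv_take_ne t 3 _ (by simp; omega)
    have m32d : t.take 3 ≠ ["MIT", "LICENSE"] := pv_take_ne t 3 _ (by simp; omega)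
    have m32e : t.take 3 ≠ ["BSD", "3-CLAUSE"] := pv_take_ne t 3 _ (by simp; omega)
    have m32f : t.take 3 ≠ ["MPL", "2.0"] := pv_take_ne t 3 _ (by simp; omega)
    have m42 : t.take 4 ≠ ["GPL", "V3"] := pv_take_ne t 4 _ (by simp; omega)
    have m42b : t.take 4 ≠ ["GPL", "V2"] := pv_take_ne t 4 _ (by simp; omega)
    have m42c : t.take 4 ≠ ["APACHE", "2.0"] := pv_take_ne t 4 _ (by simp; omega)
    have m42d : t.take 4 ≠ ["MIT", "LICENSE"] := pv_take_ne t 4 _ (by simp; omega)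
    have m42e : t.take 4 ≠ ["BSD", "3-CLAUSE"] := pv_take_ne t 4 _ (by simp; omega)
    have m42f : t.take 4 ≠ ["MPL", "2.0"] := pv_take_ne t 4 _ (by simp; omega)
    have m43 : t.take 4 ≠ ["APACHE", "LICENSE", "2.0"] := pv_take_ne t 4 _ (by simp; omega)
    simp only [List.findSome?_cons, List.findSome?_nil, hs1, hs2, hs3, hs4, hl1, hl2, hl3, hl4,
      if_neg k12, if_neg k12b, if_neg k13, if_neg k12c, if_neg k12d, if_neg k12e, if_neg k12f,
      if_neg m23, if_neg m32, if_neg m32b, if_neg m32c, if_neg m32d, if_neg m32e, if_neg m32f,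
      if_neg m42, if_neg m42b, if_neg m42c, if_neg m42d, if_neg m42e, if_neg m42f, if_neg m43,
      pvMSpec]
    split_ifs <;> simp

lemma pv_bfind_eq (parts : List String) (hp : pvSF parts) (i : Nat) (hi : i < parts.length) :
    pvBFind (PySem.Dict.getD pvIndex parts[i] []) parts i = pvMSpec (parts.drop i) := by
  have hlen : (parts.drop i).length = parts.length - i := by simp
  have hs2 : PySem.List.slice parts (some (i : Int)) (some ((i : Int) + 2)) = (parts.drop i).take 2 := by
    simpa using pv_slice_take parts i 2
  have hs3 : PySem.List.slice parts (some (i : Int)) (some ((i : Int) + 3)) = (parts.drop i).take 3 := by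
    simpa using pv_slice_take parts i 3
  obtain ⟨w1, r, ht⟩ : ∃ w r, parts.drop i = w :: r := by
    cases hd : parts.drop i with
    | nil =>
      exfalso
      have := congrArg List.length hd
      rw [hlen] at this
      simp at this
      omega
    | cons a l => exact ⟨a, l, rfl⟩
  have hw1 : parts[i] = w1 := by
    have h0 : parts[i]? = some w1 := by
      have h1 : (parts.drop i)[0]? = some w1 := by rw [ht]; rfl
      rw [List.getElem?_drop] at h1
      simpa using h1
    rw [List.getElem?_eq_getElem hi] at h0
    exact Option.some.inj h0
  rw [hw1]
  by_cases c1 : w1 = "GPL"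
  · subst c1
    rw [show PySem.Dict.getD pvIndex "GPL" []
          = [(["GPL", "V3"], "GPL-3.0-only"), (["GPL", "V2"], "GPL-2.0-only")] from by decide]
    have nAp3 : (parts.drop i).take 3 ≠ ["APACHE", "LICENSE", "2.0"] := by rw [ht]; simp
    have nAp2 : (parts.drop i).take 2 ≠ ["APACHE", "2.0"] := by rw [ht]; simp
    have nMit : (parts.drop i).take 2 ≠ ["MIT", "LICENSE"] := by rw [ht]; simp
    have nBsd : (parts.drop i).take 2 ≠ ["BSD", "3-CLAUSE"] := by rw [ht]; simp
    have nMpl : (parts.drop i).take 2 ≠ ["MPL", "2.0"] := by rw [ht]; simp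
    unfold pvBFind
    simp only [List.findSome?_cons, List.findSome?_nil, List.length_cons, List.length_nil,
      Nat.reduceAdd, Nat.cast_ofNat]
    rw [hs2]
    simp only [pvMSpec, if_neg nAp3, if_neg nAp2, if_neg nMit, if_neg nBsd, if_neg nMpl]
    split_ifs <;> simp
  by_cases c2 : w1 = "APACHE"
  · subst c2
    rw [show PySem.Dict.getD pvIndex "APACHE" []
          = [(["APACHE", "LICENSE", "2.0"], "Apache-2.0"), (["APACHE", "2.0"], "Apache-2.0")] from by decide]
    have nG3 : (parts.drop i).take 2 ≠ ["GPL", "V3"] := by rw [ht]; simp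
    have nG2 : (parts.drop i).take 2 ≠ ["GPL", "V2"] := by rw [ht]; simp
    have nMit : (parts.drop i).take 2 ≠ ["MIT", "LICENSE"] := by rw [ht]; simp
    have nBsd : (parts.drop i).take 2 ≠ ["BSD", "3-CLAUSE"] := by rw [ht]; simp
    have nMpl : (parts.drop i).take 2 ≠ ["MPL", "2.0"] := by rw [ht]; simp
    unfold pvBFind
    simp only [List.findSome?_cons, List.findSome?_nil, List.length_cons, List.length_nil,
      Nat.reduceAdd, Nat.cast_ofNat]
    rw [hs2, hs3]
    simp only [pvMSpec, if_neg nG3, if_neg nG2, if_neg nMit, if_neg nBsd, if_neg nMpl]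
    split_ifs <;> simp
  by_cases c3 : w1 = "MIT"
  · subst c3
    rw [show PySem.Dict.getD pvIndex "MIT" [] = [(["MIT", "LICENSE"], "MIT")] from by decide]
    have nAp3 : (parts.drop i).take 3 ≠ ["APACHE", "LICENSE", "2.0"] := by rw [ht]; simp
    have nG3 : (parts.drop i).take 2 ≠ ["GPL", "V3"] := by rw [ht]; simp
    have nG2 : (parts.drop i).take 2 ≠ ["GPL", "V2"] := by rw [ht]; simp
    have nAp2 : (parts.drop i).take 2 ≠ ["APACHE", "2.0"] := by rw [ht]; simp
    have nBsd : (parts.drop i).take 2 ≠ ["BSD", "3-CLAUSE"] := by rw [ht]; simp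
    have nMpl : (parts.drop i).take 2 ≠ ["MPL", "2.0"] := by rw [ht]; simp
    unfold pvBFind
    simp only [List.findSome?_cons, List.findSome?_nil, List.length_cons, List.length_nil,
      Nat.reduceAdd, Nat.cast_ofNat]
    rw [hs2]
    simp only [pvMSpec, if_neg nAp3, if_neg nG3, if_neg nG2, if_neg nAp2, if_neg nBsd, if_neg nMpl]
    split_ifs <;> simp
  by_cases c4 : w1 = "BSD"
  · subst c4
    rw [show PySem.Dict.getD pvIndex "BSD" [] = [(["BSD", "3-CLAUSE"], "BSD-3-Clause")] from by decide]
    have nAp3 : (parts.drop i).take 3 ≠ ["APACHE", "LICENSE", "2.0"] := by rw [ht]; simp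
    have nG3 : (parts.drop i).take 2 ≠ ["GPL", "V3"] := by rw [ht]; simp
    have nG2 : (parts.drop i).take 2 ≠ ["GPL", "V2"] := by rw [ht]; simp
    have nAp2 : (parts.drop i).take 2 ≠ ["APACHE", "2.0"] := by rw [ht]; simp
    have nMit : (parts.drop i).take 2 ≠ ["MIT", "LICENSE"] := by rw [ht]; simp
    have nMpl : (parts.drop i).take 2 ≠ ["MPL", "2.0"] := by rw [ht]; simp
    unfold pvBFind
    simp only [List.findSome?_cons, List.findSome?_nil, List.length_cons, List.length_nil,
      Nat.reduceAdd, Nat.cast_ofNat]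
    rw [hs2]
    simp only [pvMSpec, if_neg nAp3, if_neg nG3, if_neg nG2, if_neg nAp2, if_neg nMit, if_neg nMpl]
    split_ifs <;> simp
  by_cases c5 : w1 = "MPL"
  · subst c5
    rw [show PySem.Dict.getD pvIndex "MPL" [] = [(["MPL", "2.0"], "MPL-2.0")] from by decide]
    have nAp3 : (parts.drop i).take 3 ≠ ["APACHE", "LICENSE", "2.0"] := by rw [ht]; simp
    have nG3 : (parts.drop i).take 2 ≠ ["GPL", "V3"] := by rw [ht]; simp
    have nG2 : (parts.drop i).take 2 ≠ ["GPL", "V2"] := by rw [ht]; simp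
    have nAp2 : (parts.drop i).take 2 ≠ ["APACHE", "2.0"] := by rw [ht]; simp
    have nMit : (parts.drop i).take 2 ≠ ["MIT", "LICENSE"] := by rw [ht]; simp
    have nBsd : (parts.drop i).take 2 ≠ ["BSD", "3-CLAUSE"] := by rw [ht]; simp
    unfold pvBFind
    simp only [List.findSome?_cons, List.findSome?_nil, List.length_cons, List.length_nil,
      Nat.reduceAdd, Nat.cast_ofNat]
    rw [hs2]
    simp only [pvMSpec, if_neg nAp3, if_neg nG3, if_neg nG2, if_neg nAp2, if_neg nMit, if_neg nBsd]
    split_ifs <;> simp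
  · have hged : PySem.Dict.getD pvIndex w1 [] = [] := by
      have b1 : (("GPL" : String) == w1) = false := by simp; exact fun hh => c1 hh.symm
      have b2 : (("APACHE" : String) == w1) = false := by simp; exact fun hh => c2 hh.symm
      have b3 : (("MIT" : String) == w1) = false := by simp; exact fun hh => c3 hh.symm
      have b4 : (("BSD" : String) == w1) = false := by simp; exact fun hh => c4 hh.symm
      have b5 : (("MPL" : String) == w1) = false := by simp; exact fun hh => c5 hh.symm
      simp [PySem.Dict.getD, PySem.Dict.get?, pvIndex, List.find?, b1, b2, b3, b4, b5]
    rw [hged]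
    have nAp3 : (parts.drop i).take 3 ≠ ["APACHE", "LICENSE", "2.0"] := by rw [ht]; simp [c2]
    have nG3 : (parts.drop i).take 2 ≠ ["GPL", "V3"] := by rw [ht]; simp [c1]
    have nG2 : (parts.drop i).take 2 ≠ ["GPL", "V2"] := by rw [ht]; simp [c1]
    have nAp2 : (parts.drop i).take 2 ≠ ["APACHE", "2.0"] := by rw [ht]; simp [c2]
    have nMit : (parts.drop i).take 2 ≠ ["MIT", "LICENSE"] := by rw [ht]; simp [c3]
    have nBsd : (parts.drop i).take 2 ≠ ["BSD", "3-CLAUSE"] := by rw [ht]; simp [c4]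
    have nMpl : (parts.drop i).take 2 ≠ ["MPL", "2.0"] := by rw [ht]; simp [c5]
    unfold pvBFind
    simp only [List.findSome?_nil, pvMSpec, if_neg nAp3, if_neg nG3, if_neg nG2, if_neg nAp2,
      if_neg nMit, if_neg nBsd, if_neg nMpl]

lemma pv_loop_eq (fuel : Nat) : ∀ (parts : List String) (i : Nat) (acc : List String),
    pvSF parts → pvALoop fuel parts i acc = pvBLoop fuel parts i acc := by
  induction fuel with
  | zero => intro parts i acc _; rfl
  | succ fuel ih =>
    intro parts i acc hp
    by_cases hi : i < parts.length
    · rw [pvALoop, pvBLoop]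
      simp only [hi, dif_pos]
      rw [pv_afind_eq parts hp i hi, ← pv_bfind_eq parts hp i hi]
      cases pvBFind (PySem.Dict.getD pvIndex parts[i] []) parts i with
      | none => exact ih parts (i + 1) _ hp
      | some vk => exact ih parts (i + vk.2) _ hp
    · rw [pvALoop, pvBLoop]
      simp [hi]

-- ===== VERDICT (by name: the statement is the Claim_ definition above) =====
theorem normalize_license_string_py_spec : Claim_equal_normalize_license_string_py := by
  intro s _
  unfold Spec_normalize_license_string_py
  by_cases hs : s = ""
  · subst hs; decide
  · set words := PySem.Str.split₀ (PySem.Str.replace (PySem.Str.replace (PySem.Str.upper (PySem.Str.strip s)) "LICENSE" "") "THE " "") with hwords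
    have hsf : pvSF words := hwords ▸ pv_sf_split₀ _
    have hlook := pv_lookup words hsf
    have hA : normalize_license_string_py s
        = (match PySem.Dict.get? pvAliasMap (PySem.Str.join " " words) with
           | some v => v
           | none =>
             PySem.Str.join " "
               (pvALoop (PySem.Str.split₀ (PySem.Str.join " " words)).length
                 (PySem.Str.split₀ (PySem.Str.join " " words)) 0 [])) := by
      unfold normalize_license_string_py
      rw [if_neg hs]
    have hB : normalize_license_string_py_alt s
        = PySem.Str.join " " (pvBLoop words.length words 0 []) := rfl
    rw [hA, hB, hlook]
    by_cases c1 : words = ["GPL", "V3"]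
    · rw [c1]; decide
    by_cases c2 : words = ["GPL", "V2"]
    · rw [c2]; decide
    by_cases c3 : words = ["APACHE", "LICENSE", "2.0"]
    · rw [c3]; decide
    by_cases c4 : words = ["APACHE", "2.0"]
    · rw [c4]; decide
    by_cases c5 : words = ["MIT", "LICENSE"]
    · rw [c5]; decide
    by_cases c6 : words = ["BSD", "3-CLAUSE"]
    · rw [c6]; decide
    by_cases c7 : words = ["MPL", "2.0"]
    · rw [c7]; decide
    simp only [if_neg c1, if_neg c2, if_neg c3, if_neg c4, if_neg c5, if_neg c6, if_neg c7]
    rw [pv_split₀_join words hsf]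
    exact congrArg (PySem.Str.join " ") (pv_loop_eq words.length words 0 [] hsf)
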